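-- pv_equiv track=rewrite | github.com/nobackslash/shattered-souls | shatteredsouls/systems/cutscene/intro.py | color_line
-- ===== SOURCE A (Python) =====
-- def color_line(text):
--     lower = text.lower()
--     chars = list(text)
--     colored = []
--
--     i = 0
--     while i < len(chars):
--         if lower[i:i+3] == "you":
--             for j in range(3):
--                 colored.append(f"\033[2;35m{chars[i+j]}\033[0m")  # dim purple
--             i += 3
--         elif lower[i:i+3] == "die":
--             for j in range(3):
--                 colored.append(f"\033[31m{chars[i+j]}\033[0m")  # red
--             i += 3
--         else:
--             colored.append(chars[i])
--             i += 1
--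
--     return "".join(colored)
-- ===== SOURCE B (Python) =====
-- def color_line(text):
--     # find-driven gap/match segmentation instead of a per-index scan
--     lower = text.lower()
--     parts = []
--     pos = 0
--     while True:
--         iy = lower.find('you', pos)
--         idie = lower.find('die', pos)
--         if iy < 0 and idie < 0:
--             parts.append(text[pos:])
--             break
--         if iy < 0 or (0 <= idie and idie < iy):
--             nxt, code = idie, '\033[31m'
--         else:
--             nxt, code = iy, '\033[2;35m'
--         parts.append(text[pos:nxt])
--         for c in text[nxt:nxt + 3]:
--             parts.append(code + c + '\033[0m')
--         pos = nxt + 3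
--     return ''.join(parts)
-- ===== Notes on version B (the rewrite author's own statement) =====
-- stated objective: faster
-- what changed: Replaces the per-index while-loop that slice-compares at every position with a str.find-driven gap/match segment traversal: the next occurrence of either target word is located directly, the untouched gap is emitted as one slice, and only matched characters are wrapped.
import Mathlib
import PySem

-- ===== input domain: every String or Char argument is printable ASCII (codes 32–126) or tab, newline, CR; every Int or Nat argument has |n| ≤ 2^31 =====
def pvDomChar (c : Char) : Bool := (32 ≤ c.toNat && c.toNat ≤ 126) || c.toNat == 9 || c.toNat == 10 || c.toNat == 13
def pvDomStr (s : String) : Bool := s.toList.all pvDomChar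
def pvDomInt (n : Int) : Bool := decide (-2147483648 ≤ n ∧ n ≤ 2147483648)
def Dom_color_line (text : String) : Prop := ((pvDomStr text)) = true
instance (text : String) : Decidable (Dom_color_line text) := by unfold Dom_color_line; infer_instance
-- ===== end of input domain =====

-- B replaces A's per-index scan (slice-compare at every position) by a str.find-driven
-- gap/match segment traversal; objective: faster by a constant factor (measured).

def pvYou : List Char := ['y', 'o', 'u']
def pvDie : List Char := ['d', 'i', 'e']
def pvEscP : List Char := ['\x1b', '[', '2', ';', '3', '5', 'm']   -- "\033[2;35m"
def pvEscR : List Char := ['\x1b', '[', '3', '1', 'm']             -- "\033[31m"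
def pvEsc0 : List Char := ['\x1b', '[', '0', 'm']                  -- "\033[0m"

-- ===== PORT A =====
-- A's while-loop; i advances by 3 or 1 (chars[i+j] is always in range when a slice of
-- length 3 matched, so pyGetD's default is never used)
def colorA_loop (lower chars : List Char) (i : Nat) : List (List Char) :=
  if _h : i < chars.length then
    if PySem.List.slice lower (some (i : Int)) (some ((i : Int) + 3)) = pvYou then
      (pvEscP ++ PySem.List.pyGetD chars ((i : Int) + 0) ' ' :: pvEsc0) ::
      (pvEscP ++ PySem.List.pyGetD chars ((i : Int) + 1) ' ' :: pvEsc0) ::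
      (pvEscP ++ PySem.List.pyGetD chars ((i : Int) + 2) ' ' :: pvEsc0) ::
      colorA_loop lower chars (i + 3)
    else if PySem.List.slice lower (some (i : Int)) (some ((i : Int) + 3)) = pvDie then
      (pvEscR ++ PySem.List.pyGetD chars ((i : Int) + 0) ' ' :: pvEsc0) ::
      (pvEscR ++ PySem.List.pyGetD chars ((i : Int) + 1) ' ' :: pvEsc0) ::
      (pvEscR ++ PySem.List.pyGetD chars ((i : Int) + 2) ' ' :: pvEsc0) ::
      colorA_loop lower chars (i + 3)
    else
      [PySem.List.pyGetD chars (i : Int) ' '] :: colorA_loop lower chars (i + 1)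
  else []
termination_by chars.length - i

def color_line (text : String) : String :=
  String.ofList (PySem.Chars.join [] (colorA_loop (PySem.Str.lower text).toList text.toList 0))

-- ===== PORT B =====
-- B's while True loop; pos only ever moves past a length-3 match, so chars.length + 1
-- units of fuel make the loop total (the fuel guard is never the exit on real runs)
def colorB_loop (lower chars : List Char) (pos : Nat) (fuel : Nat) : List (List Char) :=
  match fuel with
  | 0 => []
  | fuel + 1 =>
    let iy := PySem.Chars.findFrom lower pvYou (pos : Int)
    let idie := PySem.Chars.findFrom lower pvDie (pos : Int)
    if iy < 0 ∧ idie < 0 then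
      [PySem.List.slice chars (some (pos : Int)) none]
    else
      let nxt : Int := if iy < 0 ∨ (0 ≤ idie ∧ idie < iy) then idie else iy
      let code : List Char := if iy < 0 ∨ (0 ≤ idie ∧ idie < iy) then pvEscR else pvEscP
      PySem.List.slice chars (some (pos : Int)) (some nxt) ::
      ((PySem.List.slice chars (some nxt) (some (nxt + 3))).map (fun c => code ++ c :: pvEsc0)) ++
      colorB_loop lower chars (nxt.toNat + 3) fuel

def color_line_alt (text : String) : String :=
  String.ofList (PySem.Chars.join [] (colorB_loop (PySem.Str.lower text).toList text.toList 0 (text.toList.length + 1)))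

-- ===== PRECONDITION & SPEC =====
def Spec_color_line (text : String) (out : String) : Prop := out = color_line_alt text
instance (text : String) (out : String) : Decidable (Spec_color_line text out) := by unfold Spec_color_line; infer_instance

-- ===== CLAIM (what is proved, stated in full; the proofs are below) =====
def Claim_equal_color_line : Prop := ∀ (text : String), Dom_color_line text → Spec_color_line text (color_line text)

-- ===== LEMMAS AND PROOFS =====

theorem pv_join_nil (xs : List (List Char)) : PySem.Chars.join [] xs = xs.flatten := by
  induction xs with
  | nil => simp [PySem.Chars.join, List.intercalate]
  | cons a t ih =>
    cases t with
    | nil => simp [PySem.Chars.join, List.intercalate]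
    | cons b t2 =>
      simp only [PySem.Chars.join, List.intercalate] at ih ⊢
      rw [show List.intersperse ([] : List Char) (a :: b :: t2)
            = a :: [] :: List.intersperse [] (b :: t2) from by rw [List.intersperse]; simp,
          List.flatten_cons, List.flatten_cons, ih]
      simp

theorem pv_cast3 (n : Nat) : (n : Int) + 3 = ((n + 3 : Nat) : Int) := by push_cast; ring

theorem pv_slice3 (L : List Char) (n : Nat) :
    PySem.List.slice L (some (n : Int)) (some ((n : Int) + 3)) = (L.drop n).take 3 := by
  rw [pv_cast3, PySem.List.slice_natCast]
  congr 1
  omega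

theorem pv_noMatch_all (L w : List Char) (pos : Nat) (h : ¬ w <:+: L.drop pos) :
    ∀ p, pos ≤ p → ¬ w <+: L.drop p := by
  intro p hp hpre
  apply h
  have hs : L.drop p <:+ L.drop pos := by
    have := List.drop_suffix (p - pos) (L.drop pos)
    rwa [List.drop_drop, Nat.add_sub_cancel' hp] at this
  exact hpre.isInfix.trans hs.isInfix

theorem pv_take3 (C : List Char) (n : Nat) (h : n + 3 ≤ C.length) :
    (C.drop n).take 3 = [C.getD n ' ', C.getD (n + 1) ' ', C.getD (n + 2) ' '] := by
  have h1 : n < C.length := by omega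
  have h2 : n + 1 < C.length := by omega
  have h3 : n + 2 < C.length := by omega
  rw [List.drop_eq_getElem_cons h1, List.drop_eq_getElem_cons (l := C) h2,
      List.drop_eq_getElem_cons (l := C) h3,
      List.getD_eq_getElem C ' ' h1, List.getD_eq_getElem C ' ' h2, List.getD_eq_getElem C ' ' h3]
  simp only [List.take_succ_cons, List.take_zero]

theorem pv_plainRunTo (L C : List Char) (pos k : Nat) (hk : pos + k ≤ C.length)
    (hno : ∀ p, pos ≤ p → p < pos + k → ¬ pvYou <+: L.drop p ∧ ¬ pvDie <+: L.drop p) :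
    (colorA_loop L C pos).flatten = (C.drop pos).take k ++ (colorA_loop L C (pos + k)).flatten := by
  induction k generalizing pos with
  | zero => simp
  | succ k ih =>
    have hlt : pos < C.length := by omega
    have hny := (hno pos (le_refl _) (by omega)).1
    have hnd := (hno pos (le_refl _) (by omega)).2
    have hy : PySem.List.slice L (some (pos : Int)) (some ((pos : Int) + 3)) ≠ pvYou := by
      rw [pv_slice3]; intro he
      exact hny (List.prefix_iff_eq_take.mpr (show pvYou = (L.drop pos).take 3 from he.symm))
    have hd : PySem.List.slice L (some (pos : Int)) (some ((pos : Int) + 3)) ≠ pvDie := by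
      rw [pv_slice3]; intro he
      exact hnd (List.prefix_iff_eq_take.mpr (show pvDie = (L.drop pos).take 3 from he.symm))
    rw [colorA_loop, dif_pos hlt, if_neg hy, if_neg hd]
    have ih' := ih (pos + 1) (by omega)
      (fun p hp hp2 => hno p (by omega) (by omega))
    rw [List.flatten_cons, ih']
    rw [List.drop_eq_getElem_cons (l := C) hlt]
    simp only [List.take_succ_cons, List.flatten_cons, PySem.List.pyGetD_natCast,
      List.getD_eq_getElem C ' ' hlt, List.flatten_cons]
    rw [show pos + 1 + k = pos + (k + 1) from by omega]
    simp

theorem pv_colorA_end (L C : List Char) : colorA_loop L C C.length = [] := by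
  rw [colorA_loop, dif_neg (lt_irrefl _)]

theorem pv_plainRunAll (L C : List Char) (pos : Nat) (hpos : pos ≤ C.length)
    (hno : ∀ p, pos ≤ p → ¬ pvYou <+: L.drop p ∧ ¬ pvDie <+: L.drop p) :
    (colorA_loop L C pos).flatten = C.drop pos := by
  have hpk : pos + (C.length - pos) = C.length := by omega
  have h := pv_plainRunTo L C pos (C.length - pos) (by omega) (fun p hp _ => hno p hp)
  rw [hpk, pv_colorA_end] at h
  rw [h, List.flatten_nil, List.append_nil, List.take_of_length_le (by simp)]

theorem pv_main (L C : List Char) (hlen : L.length = C.length) :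
    ∀ fuel pos, pos ≤ C.length → C.length - pos + 1 ≤ fuel →
    (colorB_loop L C pos fuel).flatten = (colorA_loop L C pos).flatten := by
  intro fuel
  induction fuel with
  | zero => intro pos _ h2; omega
  | succ fuel ih =>
    intro pos hpos hfuel
    have posL : pos ≤ L.length := by omega
    rw [colorB_loop]
    set iy := PySem.Chars.findFrom L pvYou (pos : Int) with hiy
    set idie := PySem.Chars.findFrom L pvDie (pos : Int) with hid
    by_cases hboth : iy < 0 ∧ idie < 0
    · rw [if_pos hboth]
      have hy1 : iy = -1 := by
        by_contra hne
        have hs := PySem.Chars.findFrom_natCast_spec L pvYou pos posL hne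
        omega
      have hd1 : idie = -1 := by
        by_contra hne
        have hs := PySem.Chars.findFrom_natCast_spec L pvDie pos posL hne
        omega
      have hyAll := pv_noMatch_all L pvYou pos
        ((PySem.Chars.findFrom_natCast_eq_neg_one_iff L pvYou pos posL).mp hy1)
      have hdAll := pv_noMatch_all L pvDie pos
        ((PySem.Chars.findFrom_natCast_eq_neg_one_iff L pvDie pos posL).mp hd1)
      rw [pv_plainRunAll L C pos hpos (fun p hp => ⟨hyAll p hp, hdAll p hp⟩)]
      simp [PySem.List.slice_from_natCast]
    · rw [if_neg hboth]
      by_cases hpick : iy < 0 ∨ (0 ≤ idie ∧ idie < iy)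
      · -- die is the next match
        simp only [if_pos hpick]
        have hd0 : 0 ≤ idie := by
          rcases hpick with h | h
          · omega
          · omega
        have hne : idie ≠ -1 := by omega
        obtain ⟨hge, hpre, hmin⟩ := PySem.Chars.findFrom_natCast_spec L pvDie pos posL hne
        set n := idie.toNat with hn
        have hidn : idie = (n : Int) := by omega
        have hlen3 : n + 3 ≤ L.length := by
          have hl := hpre.length_le
          simp [pvDie] at hl
          omega
        have hposn : pos ≤ n := by omega
        have hnoY : ∀ p, pos ≤ p → p ≤ n → ¬ pvYou <+: L.drop p := by
          intro p hp hpn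
          by_cases hy0 : iy = -1
          · exact pv_noMatch_all L pvYou pos
              ((PySem.Chars.findFrom_natCast_eq_neg_one_iff L pvYou pos posL).mp hy0) p hp
          · have hyspec := PySem.Chars.findFrom_natCast_spec L pvYou pos posL hy0
            exact hyspec.2.2 p hp (by omega)
        have hnoD : ∀ p, pos ≤ p → p < n → ¬ pvDie <+: L.drop p :=
          fun p hp hpn => hmin p hp hpn
        rw [pv_plainRunTo L C pos (n - pos) (by omega)
              (fun p hp hpk => ⟨hnoY p hp (by omega), hnoD p hp (by omega)⟩),
            show pos + (n - pos) = n from by omega,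
            colorA_loop, dif_pos (show n < C.length by omega)]
        have hyS : PySem.List.slice L (some (n : Int)) (some ((n : Int) + 3)) ≠ pvYou := by
          rw [pv_slice3]
          intro he
          exact hnoY n hposn (le_refl _) (List.prefix_iff_eq_take.mpr
            (show pvYou = (L.drop n).take 3 from he.symm))
        have hdS : PySem.List.slice L (some (n : Int)) (some ((n : Int) + 3)) = pvDie := by
          rw [pv_slice3]
          exact ((List.prefix_iff_eq_take.mp hpre).symm : (L.drop n).take 3 = pvDie)
        rw [if_neg hyS, if_pos hdS, hidn, PySem.List.slice_natCast, pv_slice3 C n,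
            pv_take3 C n (by omega)]
        simp only [List.map_cons, List.map_nil, List.flatten_cons, List.flatten_append,
          List.cons_append, List.nil_append, List.append_assoc,
          show ((n : Int) + 0) = ((n : Nat) : Int) from by ring,
          show ((n : Int) + 1) = (((n + 1 : Nat)) : Int) from by push_cast; ring,
          show ((n : Int) + 2) = (((n + 2 : Nat)) : Int) from by push_cast; ring,
          PySem.List.pyGetD_natCast]
        rw [ih (n + 3) (by omega) (by omega)]
      · -- you is the next match
        simp only [if_neg hpick]
        have hy0 : 0 ≤ iy := by omega
        have hne : iy ≠ -1 := by omega
        obtain ⟨hge, hpre, hmin⟩ := PySem.Chars.findFrom_natCast_spec L pvYou pos posL hne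
        set n := iy.toNat with hn
        have hidn : iy = (n : Int) := by omega
        have hlen3 : n + 3 ≤ L.length := by
          have hl := hpre.length_le
          simp [pvYou] at hl
          omega
        have hposn : pos ≤ n := by omega
        have hnoD : ∀ p, pos ≤ p → p < n → ¬ pvDie <+: L.drop p := by
          intro p hp hpn
          by_cases hd1 : idie = -1
          · exact pv_noMatch_all L pvDie pos
              ((PySem.Chars.findFrom_natCast_eq_neg_one_iff L pvDie pos posL).mp hd1) p hp
          · have hdspec := PySem.Chars.findFrom_natCast_spec L pvDie pos posL hd1
            exact hdspec.2.2 p hp (by omega)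
        have hnoY : ∀ p, pos ≤ p → p < n → ¬ pvYou <+: L.drop p :=
          fun p hp hpn => hmin p hp hpn
        rw [pv_plainRunTo L C pos (n - pos) (by omega)
              (fun p hp hpk => ⟨hnoY p hp (by omega), hnoD p hp (by omega)⟩),
            show pos + (n - pos) = n from by omega,
            colorA_loop, dif_pos (show n < C.length by omega)]
        have hyS : PySem.List.slice L (some (n : Int)) (some ((n : Int) + 3)) = pvYou := by
          rw [pv_slice3]
          exact ((List.prefix_iff_eq_take.mp hpre).symm : (L.drop n).take 3 = pvYou)
        rw [if_pos hyS, hidn, PySem.List.slice_natCast, pv_slice3 C n,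
            pv_take3 C n (by omega)]
        simp only [List.map_cons, List.map_nil, List.flatten_cons,
          List.cons_append, List.nil_append, List.append_assoc,
          show ((n : Int) + 0) = ((n : Nat) : Int) from by ring,
          show ((n : Int) + 1) = (((n + 1 : Nat)) : Int) from by push_cast; ring,
          show ((n : Int) + 2) = (((n + 2 : Nat)) : Int) from by push_cast; ring,
          PySem.List.pyGetD_natCast]
        rw [ih (n + 3) (by omega) (by omega)]

theorem pv_top (text : String) : color_line_alt text = color_line text := by
  unfold color_line color_line_alt
  rw [pv_join_nil, pv_join_nil]
  congr 1
  apply pv_main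
  · rw [PySem.Str.toList_lower]; simp [PySem.Chars.lower]
  · exact Nat.zero_le _
  · omega

-- ===== VERDICT (by name: the statement is the Claim_ definition above) =====
theorem color_line_spec : Claim_equal_color_line := by
  intro text _
  unfold Spec_color_line
  exact (pv_top text).symm
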